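-- pv_equiv track=rewrite | github.com/Saki-SKDS/voice_ai | voice_agent.py | _optimize_text_for_tts
-- ===== SOURCE A (Python) =====
-- def _optimize_text_for_tts(text):
--     """Optimiser le texte pour la synthèse vocale"""
--     # Nettoyer le texte
--     cleaned = text.strip()
--
--     # Remplacer les caractères problématiques
--     replacements = {
--         '&': 'et',
--         '%': 'pour cent',
--         '@': 'arobase',
--         '#': 'dièse',
--         '*': 'étoile',
--         '+': 'plus',
--         '=': 'égal',
--         '/': 'slash',
--     }
--
--     for old, new in replacements.items():
--         cleaned = cleaned.replace(old, new)
--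
--     # Limiter la longueur pour TTS optimal
--     if len(cleaned) > 250:
--         cleaned = cleaned[:250] + "."
--
--     return cleaned
-- ===== SOURCE B (Python) =====
-- def _optimize_text_for_tts(text):
--     """Optimiser le texte pour la synthese vocale (single-pass lookup-table version)"""
--     replacements = {
--         '&': 'et',
--         '%': 'pour cent',
--         '@': 'arobase',
--         '#': 'dièse',
--         '*': 'étoile',
--         '+': 'plus',
--         '=': 'égal',
--         '/': 'slash',
--     }
--     cleaned = ''.join(replacements.get(c, c) for c in text.strip())
--     if len(cleaned) > 250:
--         cleaned = cleaned[:250] + "."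
--     return cleaned
-- ===== Notes on version B (the rewrite author's own statement) =====
-- stated objective: alternative
-- what changed: Replaced A's 8 sequential whole-string str.replace passes with one single pass over the stripped characters using a per-character lookup table (dict.get), keeping the strip and the 250-char cap.
import Mathlib
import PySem

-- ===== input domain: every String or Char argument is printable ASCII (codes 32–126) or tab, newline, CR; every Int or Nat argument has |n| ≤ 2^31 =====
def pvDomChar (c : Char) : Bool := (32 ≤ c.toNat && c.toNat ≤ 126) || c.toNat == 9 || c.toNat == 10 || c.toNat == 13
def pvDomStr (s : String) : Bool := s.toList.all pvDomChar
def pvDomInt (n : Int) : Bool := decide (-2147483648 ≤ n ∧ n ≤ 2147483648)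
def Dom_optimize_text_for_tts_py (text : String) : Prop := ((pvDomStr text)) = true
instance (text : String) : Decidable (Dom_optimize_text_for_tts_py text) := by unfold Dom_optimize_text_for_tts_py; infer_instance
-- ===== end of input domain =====

-- B replaces A's 8 sequential whole-string replace passes by a single pass over the
-- stripped characters with a per-character lookup table (objective: alternative decomposition).

-- ===== PORT A =====
-- the dict of replacements, in Python's insertion order
def ttsReplacementsA : List (String × String) :=
  [("&", "et"), ("%", "pour cent"), ("@", "arobase"), ("#", "dièse"),
   ("*", "étoile"), ("+", "plus"), ("=", "égal"), ("/", "slash")]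

def optimize_text_for_tts_py (text : String) : String :=
  let cleaned := PySem.Str.strip text
  let cleaned := ttsReplacementsA.foldl
    (fun cl p => PySem.Str.replace cl p.1 p.2) cleaned
  if 250 < PySem.Str.len cleaned then
    String.ofList ((PySem.Str.slice cleaned none (some 250)).toList ++ ['.'])
  else cleaned

-- ===== PORT B =====
-- per-character lookup table (Python: replacements.get(c, c))
def ttsMapB : PySem.Dict Char String :=
  PySem.Dict.mk
    [('&', "et"), ('%', "pour cent"), ('@', "arobase"), ('#', "dièse"),
     ('*', "étoile"), ('+', "plus"), ('=', "égal"), ('/', "slash")]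

def optimize_text_for_tts_py_alt (text : String) : String :=
  let cleaned := (PySem.Chars.strip text.toList).flatMap
    (fun c => (ttsMapB.getD c (String.ofList [c])).toList)
  if 250 < cleaned.length then String.ofList (cleaned.take 250 ++ ['.'])
  else String.ofList cleaned

-- ===== PRECONDITION & SPEC =====
def Spec_optimize_text_for_tts_py (text : String) (out : String) : Prop := out = optimize_text_for_tts_py_alt text
instance (text : String) (out : String) : Decidable (Spec_optimize_text_for_tts_py text out) := by unfold Spec_optimize_text_for_tts_py; infer_instance

-- ===== CLAIM (what is proved, stated in full; the proofs are below) =====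
def Claim_equal_optimize_text_for_tts_py : Prop := ∀ (text : String), Dom_optimize_text_for_tts_py text → Spec_optimize_text_for_tts_py text (optimize_text_for_tts_py text)

-- ===== LEMMAS AND PROOFS =====

-- a single character substituted through one replacement pass
def subst1 (c : Char) (new : List Char) (x : Char) : List Char :=
  if x = c then new else [x]

-- replace.go with a single-char pattern and enough fuel is a flatMap of subst1
theorem replace_go_single (c : Char) (new : List Char) :
    ∀ (l : List Char) (fuel : Nat) (acc : List Char), l.length ≤ fuel →
      PySem.Chars.replace.go [c] new fuel l acc
        = acc.reverse ++ l.flatMap (subst1 c new) := by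
  intro l
  induction l with
  | nil =>
    intro fuel acc _
    cases fuel <;> simp [PySem.Chars.replace.go]
  | cons x t ih =>
    intro fuel acc hf
    cases fuel with
    | zero => simp at hf
    | succ n =>
      by_cases hx : x = c
      · subst hx
        have hpre : List.isPrefixOf [x] (x :: t) = true := by
          simp [List.isPrefixOf]
        simp only [PySem.Chars.replace.go, hpre, if_pos]
        rw [show List.drop (List.length [x]) (x :: t) = t from rfl]
        rw [ih n (new.reverse ++ acc) (by simpa using Nat.succ_le_succ_iff.mp hf)]
        simp [subst1]
      · have hpre : List.isPrefixOf [c] (x :: t) = false := by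
          simp [List.isPrefixOf]
          exact fun h => hx h.symm
        simp only [PySem.Chars.replace.go, hpre]
        rw [if_neg (by simp)]
        rw [ih n (x :: acc) (by simpa using Nat.succ_le_succ_iff.mp hf)]
        simp [subst1, hx]

-- a replace pass with a single-char pattern is a flatMap
theorem replace_single (c : Char) (new l : List Char) :
    PySem.Chars.replace l [c] new = l.flatMap (subst1 c new) := by
  have := replace_go_single c new l l.length [] (le_refl _)
  simpa [PySem.Chars.replace] using this

-- the composition of the 8 single-char substitutions, applied to one character,
-- is exactly B's lookup (the replacement values contain none of the 8 keys)
theorem composed_subst (x : Char) :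
    ((subst1 '&' "et".toList x).flatMap (fun x =>
      (subst1 '%' "pour cent".toList x).flatMap (fun x =>
      (subst1 '@' "arobase".toList x).flatMap (fun x =>
      (subst1 '#' "dièse".toList x).flatMap (fun x =>
      (subst1 '*' "étoile".toList x).flatMap (fun x =>
      (subst1 '+' "plus".toList x).flatMap (fun x =>
      (subst1 '=' "égal".toList x).flatMap
      (subst1 '/' "slash".toList))))))))
      = (ttsMapB.getD x (String.ofList [x])).toList := by
  by_cases h1 : x = '&'; · subst h1; decide
  by_cases h2 : x = '%'; · subst h2; decide
  by_cases h3 : x = '@'; · subst h3; decide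
  by_cases h4 : x = '#'; · subst h4; decide
  by_cases h5 : x = '*'; · subst h5; decide
  by_cases h6 : x = '+'; · subst h6; decide
  by_cases h7 : x = '='; · subst h7; decide
  by_cases h8 : x = '/'; · subst h8; decide
  have e1 : ('&' == x) = false := by simp [Ne.symm h1]
  have e2 : ('%' == x) = false := by simp [Ne.symm h2]
  have e3 : ('@' == x) = false := by simp [Ne.symm h3]
  have e4 : ('#' == x) = false := by simp [Ne.symm h4]
  have e5 : ('*' == x) = false := by simp [Ne.symm h5]
  have e6 : ('+' == x) = false := by simp [Ne.symm h6]
  have e7 : ('=' == x) = false := by simp [Ne.symm h7]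
  have e8 : ('/' == x) = false := by simp [Ne.symm h8]
  simp [subst1, h1, h2, h3, h4, h5, h6, h7, h8, ttsMapB, PySem.Dict.getD,
    PySem.Dict.get?, List.find?, e1, e2, e3, e4, e5, e6, e7, e8]

-- A's 8-pass cleaned list equals B's single-pass cleaned list
set_option maxHeartbeats 1000000 in
theorem cleaned_eq (s : List Char) :
    (ttsReplacementsA.foldl (fun cl p => PySem.Str.replace cl p.1 p.2)
        (String.ofList s)).toList
      = s.flatMap (fun c => (ttsMapB.getD c (String.ofList [c])).toList) := by
  simp only [ttsReplacementsA, List.foldl_cons, List.foldl_nil]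
  simp only [PySem.Str.replace, String.toList_ofList]
  rw [show ("&" : String).toList = ['&'] from rfl, replace_single]
  rw [show ("%" : String).toList = ['%'] from rfl, replace_single]
  rw [show ("@" : String).toList = ['@'] from rfl, replace_single]
  rw [show ("#" : String).toList = ['#'] from rfl, replace_single]
  rw [show ("*" : String).toList = ['*'] from rfl, replace_single]
  rw [show ("+" : String).toList = ['+'] from rfl, replace_single]
  rw [show ("=" : String).toList = ['='] from rfl, replace_single]
  rw [show ("/" : String).toList = ['/'] from rfl, replace_single]
  simp only [List.flatMap_assoc]
  exact List.flatMap_congr (fun x _ => composed_subst x)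

-- the final length cap applied to equal cleaned texts gives equal results
theorem cap_eq (clA : String) (clB : List Char) (hc : clA.toList = clB) :
    (if 250 < PySem.Str.len clA then
        String.ofList ((PySem.Str.slice clA none (some 250)).toList ++ ['.'])
      else clA)
    = (if 250 < clB.length then String.ofList (clB.take 250 ++ ['.'])
      else String.ofList clB) := by
  subst hc
  by_cases h : 250 < clA.toList.length
  · rw [if_pos (show (250 : Int) < PySem.Str.len clA by
        rw [show PySem.Str.len clA = (clA.toList.length : Int) from rfl]
        exact_mod_cast h), if_pos h]
    congr 1
    have hsl : (PySem.Str.slice clA none (some 250)).toList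
        = PySem.List.slice clA.toList none (some 250) := by
      simp [PySem.Str.slice]
    rw [hsl, PySem.List.slice_to _ (by norm_num)]
    rfl
  · rw [if_neg (show ¬ (250 : Int) < PySem.Str.len clA by
        rw [show PySem.Str.len clA = (clA.toList.length : Int) from rfl]
        exact_mod_cast h), if_neg h, String.ofList_toList]

-- ===== VERDICT (by name: the statement is the Claim_ definition above) =====
theorem optimize_text_for_tts_py_spec : Claim_equal_optimize_text_for_tts_py := by
  intro text _
  unfold Spec_optimize_text_for_tts_py optimize_text_for_tts_py optimize_text_for_tts_py_alt
  exact cap_eq _ _ (cleaned_eq (PySem.Chars.strip text.toList))
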